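-- pv_equiv track=rewrite | github.com/beryl-moza/beryl-vault-backup | ANTIDOTE PRIVATE/MOZA MUSIC MACHINE/DJ-Pipeline/scripts/step1_csv_parser.py | detect_pool_source
-- ===== SOURCE A (Python) =====
-- from typing import Dict, List, Any, Optional
--
-- def detect_pool_source(headers: List[str]) -> str:
--     """
--     Detect which DJ pool format based on headers.
--
--     Args:
--         headers: Column headers from CSV
--
--     Returns:
--         Source name or 'generic'
--     """
--     headers_lower = [h.lower().strip() for h in headers]
--
--     # Check for DJCity characteristics
--     if any('djcity' in h for h in headers_lower):
--         return 'djcity'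
--
--     # Check for Beatport characteristics
--     if any('beatport' in h for h in headers_lower) or any('primary genre' in h for h in headers_lower):
--         return 'beatport'
--
--     # Check for BPM Supreme characteristics
--     if any('bpmsupreme' in h for h in headers_lower):
--         return 'bpmsupreme'
--
--     # Check for Traxsource characteristics
--     if any('traxsource' in h for h in headers_lower):
--         return 'traxsource'
--
--     return 'generic'
-- ===== SOURCE B (Python) =====
-- def detect_pool_source(headers):
--     """
--     Detect which DJ pool format based on headers.
--
--     Single pass: test every (pattern, marker) pair against each normalized
--     header, collecting present markers in a set; then resolve by a fixed
--     priority list.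
--     """
--     patterns = [
--         ('djcity', 'djcity'),
--         ('beatport', 'beatport'),
--         ('primary genre', 'beatport'),
--         ('bpmsupreme', 'bpmsupreme'),
--         ('traxsource', 'traxsource'),
--     ]
--     found = set()
--     for h in headers:
--         hl = h.lower().strip()
--         for pat, marker in patterns:
--             if pat in hl:
--                 found.add(marker)
--     for marker in ['djcity', 'beatport', 'bpmsupreme', 'traxsource']:
--         if marker in found:
--             return marker
--     return 'generic'
-- ===== Notes on version B (the rewrite author's own statement) =====
-- stated objective: alternative
-- what changed: Replaces A's sequential per-source any-scans over the header list with a single pass that tests every (pattern, marker) pair per header into a marker set, followed by a separate fixed-priority resolution loop.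
import Mathlib
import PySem

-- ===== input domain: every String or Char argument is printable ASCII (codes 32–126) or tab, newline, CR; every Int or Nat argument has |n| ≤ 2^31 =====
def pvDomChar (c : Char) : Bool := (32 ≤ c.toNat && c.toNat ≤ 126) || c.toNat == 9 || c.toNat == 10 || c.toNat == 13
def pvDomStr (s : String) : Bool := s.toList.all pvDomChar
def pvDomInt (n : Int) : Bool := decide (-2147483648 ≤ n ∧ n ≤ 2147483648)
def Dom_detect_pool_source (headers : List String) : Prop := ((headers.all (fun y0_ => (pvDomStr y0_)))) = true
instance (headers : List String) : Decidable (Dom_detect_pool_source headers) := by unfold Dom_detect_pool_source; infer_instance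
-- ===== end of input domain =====

-- B replaces A's sequential per-source scans of the header list with one table-building pass
-- (collecting source markers in a set) followed by a fixed-priority resolution loop (objective: alternative).

-- ===== PORT A =====
def detect_pool_source (headers : List String) : String :=
  let headers_lower := headers.map (fun h => PySem.Str.strip (PySem.Str.lower h))
  if headers_lower.any (fun h => PySem.Str.isIn "djcity" h) then "djcity"
  else if headers_lower.any (fun h => PySem.Str.isIn "beatport" h)
       || headers_lower.any (fun h => PySem.Str.isIn "primary genre" h) then "beatport"
  else if headers_lower.any (fun h => PySem.Str.isIn "bpmsupreme" h) then "bpmsupreme"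
  else if headers_lower.any (fun h => PySem.Str.isIn "traxsource" h) then "traxsource"
  else "generic"

-- ===== PORT B =====
def pvPatterns : List (String × String) :=
  [("djcity", "djcity"), ("beatport", "beatport"), ("primary genre", "beatport"),
   ("bpmsupreme", "bpmsupreme"), ("traxsource", "traxsource")]

def detect_pool_source_alt (headers : List String) : String :=
  let found : PySem.Set String :=
    headers.foldl (fun s h =>
      let hl := PySem.Str.strip (PySem.Str.lower h)
      pvPatterns.foldl (fun s pm => if PySem.Str.isIn pm.1 hl then PySem.Set.add s pm.2 else s) s)
      PySem.Set.empty
  match ["djcity", "beatport", "bpmsupreme", "traxsource"].find?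
          (fun m => PySem.Set.contains found m) with
  | some m => m
  | none => "generic"

-- ===== PRECONDITION & SPEC =====
def Spec_detect_pool_source (headers : List String) (out : String) : Prop := out = detect_pool_source_alt headers
instance (headers : List String) (out : String) : Decidable (Spec_detect_pool_source headers out) := by unfold Spec_detect_pool_source; infer_instance

-- ===== CLAIM (what is proved, stated in full; the proofs are below) =====
def Claim_equal_detect_pool_source : Prop := ∀ (headers : List String), Dom_detect_pool_source headers → Spec_detect_pool_source headers (detect_pool_source headers)

-- ===== LEMMAS AND PROOFS =====

-- one header's inner pass over an arbitrary pattern table: what lands in the set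
theorem mem_markStep (ps : List (String × String)) (s : PySem.Set String) (hl m : String) :
    m ∈ ps.foldl (fun s pm => if PySem.Str.isIn pm.1 hl then PySem.Set.add s pm.2 else s) s
    ↔ m ∈ s ∨ ∃ pm ∈ ps, pm.2 = m ∧ PySem.Str.isIn pm.1 hl = true := by
  induction ps generalizing s with
  | nil => simp
  | cons p ps ih =>
    rw [List.foldl_cons]
    by_cases hp : PySem.Str.isIn p.1 hl = true
    · rw [if_pos hp, ih]
      constructor
      · rintro (hm | ⟨pm, hpm, rfl, hin⟩)
        · rcases (PySem.Set.mem_add _ _ _).mp hm with h | rfl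
          · exact Or.inl h
          · exact Or.inr ⟨p, by simp, rfl, hp⟩
        · exact Or.inr ⟨pm, List.mem_cons_of_mem _ hpm, rfl, hin⟩
      · rintro (hm | ⟨pm, hpm, rfl, hin⟩)
        · exact Or.inl ((PySem.Set.mem_add _ _ _).mpr (Or.inl hm))
        · rcases List.mem_cons.mp hpm with rfl | hpm'
          · exact Or.inl ((PySem.Set.mem_add _ _ _).mpr (Or.inr rfl))
          · exact Or.inr ⟨pm, hpm', rfl, hin⟩
    · rw [if_neg hp, ih]
      constructor
      · rintro (hm | ⟨pm, hpm, rfl, hin⟩)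
        · exact Or.inl hm
        · exact Or.inr ⟨pm, List.mem_cons_of_mem _ hpm, rfl, hin⟩
      · rintro (hm | ⟨pm, hpm, rfl, hin⟩)
        · exact Or.inl hm
        · rcases List.mem_cons.mp hpm with rfl | hpm'
          · exact absurd hin hp
          · exact Or.inr ⟨pm, hpm', rfl, hin⟩

-- membership in B's fully accumulated marker set
theorem mem_found (headers : List String) (s : PySem.Set String) (m : String) :
    m ∈ headers.foldl (fun s h =>
      pvPatterns.foldl (fun s pm =>
        if PySem.Str.isIn pm.1 (PySem.Str.strip (PySem.Str.lower h)) then PySem.Set.add s pm.2 else s) s) s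
    ↔ m ∈ s ∨ ∃ h ∈ headers, ∃ pm ∈ pvPatterns,
        pm.2 = m ∧ PySem.Str.isIn pm.1 (PySem.Str.strip (PySem.Str.lower h)) = true := by
  induction headers generalizing s with
  | nil => simp
  | cons h hs ih =>
    rw [List.foldl_cons, ih, mem_markStep]
    simp only [List.mem_cons]
    constructor
    · rintro (⟨hm | ⟨pm, hpm, rfl, hin⟩⟩ | ⟨h', hh', pm, hpm, rfl, hin⟩)
      · tauto
      · exact Or.inr ⟨h, Or.inl rfl, pm, hpm, rfl, hin⟩
      · exact Or.inr ⟨h', Or.inr hh', pm, hpm, rfl, hin⟩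
    · rintro (hm | ⟨h', (rfl | hh'), pm, hpm, rfl, hin⟩)
      · tauto
      · exact Or.inl (Or.inr ⟨pm, hpm, rfl, hin⟩)
      · exact Or.inr ⟨h', hh', pm, hpm, rfl, hin⟩

theorem contains_found (headers : List String) (m : String) :
    PySem.Set.contains
      (headers.foldl (fun s h =>
        pvPatterns.foldl (fun s pm =>
          if PySem.Str.isIn pm.1 (PySem.Str.strip (PySem.Str.lower h)) then PySem.Set.add s pm.2 else s) s)
        PySem.Set.empty) m = true
    ↔ ∃ h ∈ headers, ∃ pm ∈ pvPatterns,
        pm.2 = m ∧ PySem.Str.isIn pm.1 (PySem.Str.strip (PySem.Str.lower h)) = true := by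
  rw [PySem.Set.contains_iff, mem_found]
  simp [PySem.Set.empty]

-- ===== VERDICT (by name: the statement is the Claim_ definition above) =====
theorem detect_pool_source_spec : Claim_equal_detect_pool_source := by
  intro headers _
  unfold Spec_detect_pool_source detect_pool_source detect_pool_source_alt
  have e1 : PySem.Set.contains
      (headers.foldl (fun s h =>
        pvPatterns.foldl (fun s pm =>
          if PySem.Str.isIn pm.1 (PySem.Str.strip (PySem.Str.lower h)) then PySem.Set.add s pm.2 else s) s)
        PySem.Set.empty) "djcity"
      = (headers.map (fun h => PySem.Str.strip (PySem.Str.lower h))).any (fun h => PySem.Str.isIn "djcity" h) := by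
    rw [Bool.eq_iff_iff, contains_found, List.any_eq_true]
    constructor
    · rintro ⟨h, hh, pm, hpm, hm, hin⟩
      simp only [pvPatterns, List.mem_cons, List.not_mem_nil, or_false] at hpm
      rcases hpm with rfl | rfl | rfl | rfl | rfl
      · exact ⟨_, List.mem_map_of_mem hh, hin⟩
      · exact absurd hm (by decide)
      · exact absurd hm (by decide)
      · exact absurd hm (by decide)
      · exact absurd hm (by decide)
    · rintro ⟨x, hx, hin⟩
      obtain ⟨h, hh, rfl⟩ := List.mem_map.mp hx
      exact ⟨h, hh, ("djcity", "djcity"), by simp [pvPatterns], rfl, hin⟩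
  have e2 : PySem.Set.contains
      (headers.foldl (fun s h =>
        pvPatterns.foldl (fun s pm =>
          if PySem.Str.isIn pm.1 (PySem.Str.strip (PySem.Str.lower h)) then PySem.Set.add s pm.2 else s) s)
        PySem.Set.empty) "beatport"
      = ((headers.map (fun h => PySem.Str.strip (PySem.Str.lower h))).any (fun h => PySem.Str.isIn "beatport" h)
         || (headers.map (fun h => PySem.Str.strip (PySem.Str.lower h))).any (fun h => PySem.Str.isIn "primary genre" h)) := by
    rw [Bool.eq_iff_iff, contains_found, Bool.or_eq_true, List.any_eq_true, List.any_eq_true]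
    constructor
    · rintro ⟨h, hh, pm, hpm, hm, hin⟩
      simp only [pvPatterns, List.mem_cons, List.not_mem_nil, or_false] at hpm
      rcases hpm with rfl | rfl | rfl | rfl | rfl
      · exact absurd hm (by decide)
      · exact Or.inl ⟨_, List.mem_map_of_mem hh, hin⟩
      · exact Or.inr ⟨_, List.mem_map_of_mem hh, hin⟩
      · exact absurd hm (by decide)
      · exact absurd hm (by decide)
    · rintro (⟨x, hx, hin⟩ | ⟨x, hx, hin⟩) <;> obtain ⟨h, hh, rfl⟩ := List.mem_map.mp hx
      · exact ⟨h, hh, ("beatport", "beatport"), by simp [pvPatterns], rfl, hin⟩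
      · exact ⟨h, hh, ("primary genre", "beatport"), by simp [pvPatterns], rfl, hin⟩
  have e3 : PySem.Set.contains
      (headers.foldl (fun s h =>
        pvPatterns.foldl (fun s pm =>
          if PySem.Str.isIn pm.1 (PySem.Str.strip (PySem.Str.lower h)) then PySem.Set.add s pm.2 else s) s)
        PySem.Set.empty) "bpmsupreme"
      = (headers.map (fun h => PySem.Str.strip (PySem.Str.lower h))).any (fun h => PySem.Str.isIn "bpmsupreme" h) := by
    rw [Bool.eq_iff_iff, contains_found, List.any_eq_true]
    constructor
    · rintro ⟨h, hh, pm, hpm, hm, hin⟩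
      simp only [pvPatterns, List.mem_cons, List.not_mem_nil, or_false] at hpm
      rcases hpm with rfl | rfl | rfl | rfl | rfl
      · exact absurd hm (by decide)
      · exact absurd hm (by decide)
      · exact absurd hm (by decide)
      · exact ⟨_, List.mem_map_of_mem hh, hin⟩
      · exact absurd hm (by decide)
    · rintro ⟨x, hx, hin⟩
      obtain ⟨h, hh, rfl⟩ := List.mem_map.mp hx
      exact ⟨h, hh, ("bpmsupreme", "bpmsupreme"), by simp [pvPatterns], rfl, hin⟩
  have e4 : PySem.Set.contains
      (headers.foldl (fun s h =>
        pvPatterns.foldl (fun s pm =>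
          if PySem.Str.isIn pm.1 (PySem.Str.strip (PySem.Str.lower h)) then PySem.Set.add s pm.2 else s) s)
        PySem.Set.empty) "traxsource"
      = (headers.map (fun h => PySem.Str.strip (PySem.Str.lower h))).any (fun h => PySem.Str.isIn "traxsource" h) := by
    rw [Bool.eq_iff_iff, contains_found, List.any_eq_true]
    constructor
    · rintro ⟨h, hh, pm, hpm, hm, hin⟩
      simp only [pvPatterns, List.mem_cons, List.not_mem_nil, or_false] at hpm
      rcases hpm with rfl | rfl | rfl | rfl | rfl
      · exact absurd hm (by decide)
      · exact absurd hm (by decide)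
      · exact absurd hm (by decide)
      · exact absurd hm (by decide)
      · exact ⟨_, List.mem_map_of_mem hh, hin⟩
    · rintro ⟨x, hx, hin⟩
      obtain ⟨h, hh, rfl⟩ := List.mem_map.mp hx
      exact ⟨h, hh, ("traxsource", "traxsource"), by simp [pvPatterns], rfl, hin⟩
  simp only [List.find?, e1, e2, e3, e4]
  by_cases c1 : (headers.map (fun h => PySem.Str.strip (PySem.Str.lower h))).any (fun h => PySem.Str.isIn "djcity" h) = true
  case pos => simp only [c1]; simp
  case neg =>
    rw [Bool.not_eq_true] at c1
    by_cases c2 : (headers.map (fun h => PySem.Str.strip (PySem.Str.lower h))).any (fun h => PySem.Str.isIn "beatport" h) = true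
    case pos => simp only [c1, c2]; simp
    case neg =>
      rw [Bool.not_eq_true] at c2
      by_cases c3 : (headers.map (fun h => PySem.Str.strip (PySem.Str.lower h))).any (fun h => PySem.Str.isIn "primary genre" h) = true
      case pos => simp only [c1, c2, c3]; simp
      case neg =>
        rw [Bool.not_eq_true] at c3
        by_cases c4 : (headers.map (fun h => PySem.Str.strip (PySem.Str.lower h))).any (fun h => PySem.Str.isIn "bpmsupreme" h) = true
        case pos => simp only [c1, c2, c3, c4]; simp
        case neg =>
          rw [Bool.not_eq_true] at c4
          by_cases c5 : (headers.map (fun h => PySem.Str.strip (PySem.Str.lower h))).any (fun h => PySem.Str.isIn "traxsource" h) = true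
          case pos => simp only [c1, c2, c3, c4, c5]; simp
          case neg =>
            rw [Bool.not_eq_true] at c5
            simp only [c1, c2, c3, c4, c5]
            simp
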